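-- pv_equiv track=rewrite | github.com/RickMu/Acx-API | alt_coin/text_filters/tf_idf.py | keywords_selection
-- ===== SOURCE A (Python) =====
-- def keywords_selection(docs, keywords):
--     '''
--     Purely to print out how many keywords are in each doc
--     one keyword is only counted once
--     '''
--
--     keyword_dict = {}
--
--     for doc in docs:
--         keyword_dict[doc] ={}
--
--         for para in docs[doc]:
--             words = para.split(' ')
--
--             for word in words:
--                 if word in keywords:
--                     keyword_dict[doc][word] = 1
--
--     keyword_counts = {}
--
--     for doc in keyword_dict:
--         keyword_counts[doc] = len(keyword_dict[doc].keys())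
--
--     return keyword_counts
-- ===== SOURCE B (Python) =====
-- def keywords_selection(docs, keywords):
--     '''Simpler: one word-set per doc checked against the distinct keywords; no dict-of-dicts.'''
--     keyword_set = set(keywords)
--     keyword_counts = {}
--     for doc, paras in docs.items():
--         words = set()
--         for para in paras:
--             words.update(para.split(' '))
--         keyword_counts[doc] = sum(1 for kw in keyword_set if kw in words)
--     return keyword_counts
-- ===== Notes on version B (the rewrite author's own statement) =====
-- stated objective: simpler
-- what changed: Replaces A's dict-of-dicts with per-word membership tests in the keyword list and a second counting pass by a single pass that builds one word set per doc and counts which distinct keywords fall in it.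
import Mathlib
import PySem

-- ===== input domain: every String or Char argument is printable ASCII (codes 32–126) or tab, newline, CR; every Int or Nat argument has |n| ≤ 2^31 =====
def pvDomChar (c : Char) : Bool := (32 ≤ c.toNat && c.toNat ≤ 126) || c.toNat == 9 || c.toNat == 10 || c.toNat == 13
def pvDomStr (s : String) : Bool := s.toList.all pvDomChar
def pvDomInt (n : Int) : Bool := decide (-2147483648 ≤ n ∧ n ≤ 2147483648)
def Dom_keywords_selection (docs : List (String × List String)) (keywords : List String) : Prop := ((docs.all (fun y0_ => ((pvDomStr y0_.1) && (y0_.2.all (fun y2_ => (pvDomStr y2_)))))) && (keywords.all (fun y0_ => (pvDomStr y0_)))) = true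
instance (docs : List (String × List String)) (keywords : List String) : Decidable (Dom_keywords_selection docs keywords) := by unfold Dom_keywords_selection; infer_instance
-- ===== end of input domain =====

-- B builds one word set per doc and counts the distinct keywords in it, instead of A's
-- dict-of-dicts with a per-word membership test plus a second counting pass (objective: simpler).

-- ===== PORT A =====
-- para.split(' '): exact, since the separator " " is nonempty split? always returns some
def pvSplit (s : String) : List String := (PySem.Str.split? s " ").getD []

-- the inner two loops of A: for para in docs[doc]: for word in para.split(' '): if word in keywords: d[word] = 1
def pvInnerA (keywords : List String) (paras : List String) : PySem.Dict String Int :=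
  paras.foldl (fun d para =>
    (pvSplit para).foldl
      (fun d word => if keywords.contains word then d.insert word 1 else d) d)
    PySem.Dict.empty

def keywords_selection (docs : List (String × List String)) (keywords : List String) : List (String × Int) :=
  -- keyword_dict: doc ↦ {word ↦ 1}; 'docs[doc]' is the dict lookup, ported as getD on the dict
  let kd : PySem.Dict String (PySem.Dict String Int) :=
    docs.foldl (fun kd p =>
      kd.insert p.1 (pvInnerA keywords ((PySem.Dict.mk docs).getD p.1 []))) PySem.Dict.empty
  -- keyword_counts: for doc in keyword_dict: counts[doc] = len(keyword_dict[doc].keys())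
  (kd.keys.foldl (fun kc doc =>
      kc.insert doc (((kd.getD doc PySem.Dict.empty).keys).length : Int)) PySem.Dict.empty).items

-- ===== PORT B =====
def keywords_selection_alt (docs : List (String × List String)) (keywords : List String) : List (String × Int) :=
  let keywordSet : PySem.Set String := PySem.Set.ofList keywords
  (docs.foldl (fun kc p =>
      let words : PySem.Set String :=
        p.2.foldl (fun ws para => PySem.Set.update ws (pvSplit para)) PySem.Set.empty
      kc.insert p.1
        (keywordSet.foldl (fun n kw => if words.contains kw then n + 1 else n) (0 : Int)))
    PySem.Dict.empty).items

-- ===== PRECONDITION & SPEC =====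
-- Pre_ excludes association lists with duplicate doc keys: the Python argument is a dict, which
-- cannot hold duplicate keys, so such lists do not represent any input A is ever run on.
def Pre_keywords_selection (docs : List (String × List String)) (keywords : List String) : Prop :=
  (docs.map Prod.fst).Nodup
instance (docs : List (String × List String)) (keywords : List String) : Decidable (Pre_keywords_selection docs keywords) := by unfold Pre_keywords_selection; infer_instance

def pvWitness_keywords_selection : (List (String × List String)) × List String :=
  ([("d1", ["x y", "z"]), ("d2", ["y"])], ["y", "z", "q"])

def Spec_keywords_selection (docs : List (String × List String)) (keywords : List String) (out : List (String × Int)) : Prop := out = keywords_selection_alt docs keywords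
instance (docs : List (String × List String)) (keywords : List String) (out : List (String × Int)) : Decidable (Spec_keywords_selection docs keywords out) := by unfold Spec_keywords_selection; infer_instance

-- ===== CLAIM (what is proved, stated in full; the proofs are below) =====
def Claim_equal_keywords_selection : Prop := ∀ (docs : List (String × List String)) (keywords : List String), Dom_keywords_selection docs keywords → Pre_keywords_selection docs keywords → Spec_keywords_selection docs keywords (keywords_selection docs keywords)

-- ===== LEMMAS AND PROOFS =====

-- a guarded fold is a fold over the filtered list
theorem pv_foldl_if_filter {α β : Type} (c : α → Bool) (g : β → α → β) :
    ∀ (l : List α) (d : β),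
      l.foldl (fun d x => if c x then g d x else d) d = (l.filter c).foldl g d := by
  intro l
  induction l with
  | nil => intro d; rfl
  | cons x xs ih =>
    intro d
    by_cases h : c x = true
    · simp [List.foldl, List.filter, h, ih]
    · simp [List.foldl, List.filter, h, ih]

-- a counting fold is the length of the filtered list
theorem pv_foldl_count {α : Type} (c : α → Bool) :
    ∀ (l : List α) (n : Int),
      l.foldl (fun n x => if c x then n + 1 else n) n = n + ((l.filter c).length : Int) := by
  intro l
  induction l with
  | nil => intro n; simp
  | cons x xs ih =>
    intro n
    by_cases h : c x = true
    · simp [List.foldl, List.filter, h, ih]; ring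
    · simp [List.foldl, List.filter, h, ih]

-- chained Set.update over a list of lists is one update by the flatten
theorem pv_foldl_update {α : Type} [BEq α] :
    ∀ (ls : List (List α)) (s : PySem.Set α),
      ls.foldl (fun ws l => PySem.Set.update ws l) s
        = PySem.Set.update s ls.flatten := by
  intro ls
  induction ls with
  | nil => intro s; simp [PySem.Set.update]
  | cons l ls ih =>
    intro s
    show List.foldl _ (PySem.Set.update s l) ls = _
    rw [ih, List.flatten_cons]
    simp [PySem.Set.update, List.foldl_append]

-- both counts equal the cardinality of {w | w ∈ words ∧ w ∈ keywords}
theorem pv_counts_eq (keywords : List String) (allWords : List String) :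
    ((PySem.Set.ofList (allWords.filter (fun w => keywords.contains w))).length : Int)
      = (((PySem.Set.ofList keywords).filter (fun kw => decide (kw ∈ allWords))).length : Int) := by
  have h1 : (PySem.Set.ofList (allWords.filter (fun w => keywords.contains w))).Nodup :=
    PySem.Set.nodup_ofList _
  have h2 : ((PySem.Set.ofList keywords).filter (fun kw => decide (kw ∈ allWords))).Nodup :=
    (PySem.Set.nodup_ofList keywords).filter _
  have hperm : (PySem.Set.ofList (allWords.filter (fun w => keywords.contains w))).Perm
      ((PySem.Set.ofList keywords).filter (fun kw => decide (kw ∈ allWords))) := by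
    refine (List.perm_ext_iff_of_nodup h1 h2).mpr ?_
    intro x
    simp [PySem.Set.mem_ofList, List.mem_filter]
    tauto
  exact_mod_cast hperm.length_eq

-- B's value for one doc, rewritten as a filter length
theorem pv_B_value (keywords : List String) (paras : List String) :
    ((PySem.Set.ofList keywords).foldl
        (fun n kw => if (paras.foldl (fun ws para => PySem.Set.update ws (pvSplit para))
            PySem.Set.empty).contains kw then n + 1 else n) (0 : Int))
      = (((PySem.Set.ofList keywords).filter
            (fun kw => decide (kw ∈ (paras.map (fun para => pvSplit para)).flatten))).length : Int) := by
  have hw : (paras.foldl (fun ws para => PySem.Set.update ws (pvSplit para)) PySem.Set.empty)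
      = PySem.Set.ofList (paras.map (fun para => pvSplit para)).flatten := by
    have := pv_foldl_update (ls := paras.map (fun para => pvSplit para)) (s := PySem.Set.empty)
    simpa [List.foldl_map, PySem.Set.update_nil_left] using this
  rw [show (fun n kw => if (paras.foldl (fun ws para => PySem.Set.update ws (pvSplit para))
            PySem.Set.empty).contains kw then n + 1 else n)
      = (fun (n : Int) kw => if (PySem.Set.ofList (paras.map (fun para => pvSplit para)).flatten).contains kw then n + 1 else n) from by rw [hw]]
  rw [pv_foldl_count, zero_add]
  norm_cast
  refine congrArg List.length (List.filter_congr ?_)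
  intro x _
  by_cases h : x ∈ (List.map (fun para => pvSplit para) paras).flatten
  · simp [h, PySem.Set.mem_ofList]
  · simp [h, PySem.Set.mem_ofList]

-- A's inner dict keys count, rewritten as a Set length
theorem pv_A_value (keywords : List String) (paras : List String) :
    (((pvInnerA keywords paras).keys).length : Int)
      = ((PySem.Set.ofList
            ((paras.map (fun para => pvSplit para)).flatten.filter
              (fun w => keywords.contains w))).length : Int) := by
  unfold pvInnerA
  have h : ∀ (d : PySem.Dict String Int),
      (paras.foldl (fun d para =>
        (pvSplit para).foldl
          (fun d word => if keywords.contains word then d.insert word 1 else d) d) d).keys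
      = PySem.Set.update d.keys
          ((paras.map (fun para => pvSplit para)).flatten.filter (fun w => keywords.contains w)) := by
    intro d
    induction paras generalizing d with
    | nil => simp [PySem.Set.update]
    | cons para ps ih =>
      show (List.foldl _ ((pvSplit para).foldl
          (fun d word => if keywords.contains word then d.insert word 1 else d) d) ps).keys = _
      rw [ih, pv_foldl_if_filter (fun w => keywords.contains w)
            (fun (d : PySem.Dict String Int) word => d.insert word 1),
          PySem.Dict.keys_foldl_insert]
      simp [PySem.Set.update, List.foldl_append, List.filter_append]
  rw [h PySem.Dict.empty]
  simp [PySem.Set.update_nil_left, PySem.Dict.keys_empty]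

-- ===== VERDICT (by name: the statement is the Claim_ definition above) =====
theorem keywords_selection_spec : Claim_equal_keywords_selection := by
  intro docs keywords _ hpre
  unfold Spec_keywords_selection keywords_selection keywords_selection_alt
  -- name the per-doc values of the two sides
  set vA : String × List String → PySem.Dict String Int :=
    fun p => pvInnerA keywords ((PySem.Dict.mk docs).getD p.1 []) with hvA
  set vB : String × List String → Int :=
    fun p => (PySem.Set.ofList keywords).foldl
        (fun n kw => if (p.2.foldl (fun ws para => PySem.Set.update ws (pvSplit para))
            PySem.Set.empty).contains kw then n + 1 else n) (0 : Int) with hvB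
  have hnd : (docs.map Prod.fst).Nodup := hpre
  -- kd's items list
  have hkd : (docs.foldl (fun (kd : PySem.Dict String (PySem.Dict String Int)) p => kd.insert p.1 (vA p)) PySem.Dict.empty).items
      = docs.map (fun p => (p.1, vA p)) := by
    have := PySem.Dict.items_foldl_insert_fresh (l := docs) (k := Prod.fst) (v := vA)
      (d := PySem.Dict.empty) (by intro a _; simp [PySem.Dict.contains_empty]) hnd
    simpa [PySem.Dict.items] using this
  have hkdD : (docs.foldl (fun (kd : PySem.Dict String (PySem.Dict String Int)) p => kd.insert p.1 (vA p)) PySem.Dict.empty)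
      = PySem.Dict.mk (docs.map (fun p => (p.1, vA p))) := by
    apply PySem.Dict.ext; simpa using hkd
  have hkeys : (PySem.Dict.mk (docs.map (fun p => (p.1, vA p)))).keys
      = docs.map Prod.fst := by
    simp [PySem.Dict.keys, List.map_map]
  -- the second pass of A appends fresh keys too
  have hA : (((docs.map Prod.fst).foldl (fun (kc : PySem.Dict String Int) doc =>
        kc.insert doc (((PySem.Dict.mk (docs.map (fun p => (p.1, vA p)))).getD doc PySem.Dict.empty).keys.length : Int))
        PySem.Dict.empty).items)
      = (docs.map Prod.fst).map (fun doc =>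
          (doc, (((PySem.Dict.mk (docs.map (fun p => (p.1, vA p)))).getD doc PySem.Dict.empty).keys.length : Int))) := by
    have := PySem.Dict.items_foldl_insert_fresh (l := docs.map Prod.fst) (k := id)
      (v := fun doc => (((PySem.Dict.mk (docs.map (fun p => (p.1, vA p)))).getD doc PySem.Dict.empty).keys.length : Int))
      (d := PySem.Dict.empty) (by intro a _; simp [PySem.Dict.contains_empty]) (by simpa using hnd)
    simpa [PySem.Dict.items] using this
  -- B's items list
  have hB : (docs.foldl (fun (kc : PySem.Dict String Int) p => kc.insert p.1 (vB p)) PySem.Dict.empty).items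
      = docs.map (fun p => (p.1, vB p)) := by
    have := PySem.Dict.items_foldl_insert_fresh (l := docs) (k := Prod.fst) (v := vB)
      (d := PySem.Dict.empty) (by intro a _; simp [PySem.Dict.contains_empty]) hnd
    simpa [PySem.Dict.items] using this
  simp only [hvA, hvB] at *
  rw [hkdD, hkeys, hA, hB, List.map_map]
  apply List.map_congr_left
  intro p hp
  have hndm : ((docs.map (fun p => (p.1, vA p))).map Prod.fst).Nodup := by
    simpa [List.map_map] using hnd
  have hget : (PySem.Dict.mk (docs.map (fun p => (p.1, vA p)))).getD p.1 PySem.Dict.empty = vA p := by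
    have hm : (p.1, vA p) ∈ docs.map (fun p => (p.1, vA p)) := List.mem_map_of_mem hp
    exact PySem.Dict.getD_of_mem_items _ hm hndm _
  have hdocs : (PySem.Dict.mk docs).getD p.1 [] = p.2 := by
    have : (PySem.Dict.mk docs).keys.Nodup := hnd
    exact PySem.Dict.getD_of_mem_items _ hp this _
  simp only [Function.comp_apply]
  rw [hget]
  simp only [vA]
  rw [hdocs, pv_A_value, pv_B_value, pv_counts_eq]
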